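-- pv_equiv track=rewrite | github.com/tooter9/Youvideo | filevault.py | build_lut
-- ===== SOURCE A (Python) =====
-- def build_lut(levels):
--     lut = [0] * 256
--     for v in range(256):
--         best_i = 0
--         best_d = abs(v - levels[0])
--         for i in range(1, len(levels)):
--             d = abs(v - levels[i])
--             if d < best_d:
--                 best_i = i
--                 best_d = d
--         lut[v] = best_i
--     return lut
-- ===== SOURCE B (Python) =====
-- def build_lut(levels):
--     # first occurrence index of each distinct level value
--     first = {}
--     for i, x in enumerate(levels):
--         if x not in first:
--             first[x] = i
--     vals = sorted(first)
--     lut = []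
--     for v in range(256):
--         # hand-rolled bisect_left (A imports nothing, so no bisect module)
--         lo, hi = 0, len(vals)
--         while lo < hi:
--             mid = (lo + hi) // 2
--             if vals[mid] < v:
--                 lo = mid + 1
--             else:
--                 hi = mid
--         best = None
--         for u in vals[max(lo - 1, 0):lo + 1]:
--             cand = (abs(v - u), first[u])
--             if best is None or cand < best:
--                 best = cand
--         lut.append(best[1])
--     return lut
-- ===== Notes on version B (the rewrite author's own statement) =====
-- stated objective: faster
-- what changed: Replaces the 256-by-n nearest-level scan with a first-occurrence index map, one sort of the distinct level values, and a hand-rolled binary search per LUT entry that only compares the two neighbouring values (ties resolved by lowest original index, as in A).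
import Mathlib
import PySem

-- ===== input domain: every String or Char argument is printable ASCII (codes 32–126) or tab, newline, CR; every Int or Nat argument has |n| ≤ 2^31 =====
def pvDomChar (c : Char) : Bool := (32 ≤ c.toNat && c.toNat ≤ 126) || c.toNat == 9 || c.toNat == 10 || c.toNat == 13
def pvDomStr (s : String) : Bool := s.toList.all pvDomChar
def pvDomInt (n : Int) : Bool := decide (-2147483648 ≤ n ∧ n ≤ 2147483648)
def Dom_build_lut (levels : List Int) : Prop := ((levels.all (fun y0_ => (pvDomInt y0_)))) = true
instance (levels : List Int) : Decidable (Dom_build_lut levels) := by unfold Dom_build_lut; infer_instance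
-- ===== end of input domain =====

-- B replaces A's 256×n linear scans by sorting the distinct level values once and binary-searching each v's two
-- neighbours (faster); both raise on empty levels, which Pre_ excludes.

-- ===== PORT A =====
-- literal port of A: for each v in range(256), a scan over levels[1:] tracking (best_i, best_d).
-- levels[0] is pyGetD levels 0 0: exact under Pre_ (levels ≠ []; Python raises IndexError on []).
def build_lut (levels : List Int) : List Int :=
  (PySem.List.pyRange 0 256 1).map (fun v =>
    ((PySem.List.pyRange 1 (levels.length : Int) 1).foldl
      (fun (b : Int × Int) i =>
        let d := |v - PySem.List.pyGetD levels i 0|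
        if d < b.2 then (i, d) else b)
      (0, |v - PySem.List.pyGetD levels 0 0|)).1)

-- ===== PORT B =====

-- first[x] = index of first occurrence of x in levels ('if x not in first: first[x] = i')
def bFirstDict (levels : List Int) : PySem.Dict Int Int :=
  (PySem.List.enumerate levels 0).foldl
    (fun d p => if d.contains p.2 then d else d.insert p.2 p.1) PySem.Dict.empty

-- vals = sorted(first)  (sorted distinct level values)
def bVals (levels : List Int) : List Int :=
  PySem.List.sorted (bFirstDict levels).keys (fun x => x) false

-- hand-rolled bisect_left loop of Source B ('while lo < hi: …'), exact step for step;
-- the Nat fuel (hi - lo at entry, strictly decreasing across iterations) is only a totality guard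
def bBisectGo : Nat → List Int → Int → Int → Int → Int
  | 0, _, _, lo, _ => lo
  | fuel + 1, vals, v, lo, hi =>
    if lo < hi then
      let mid := PySem.Int.floordiv (lo + hi) 2
      if PySem.List.pyGetD vals mid 0 < v then bBisectGo fuel vals v (mid + 1) hi
      else bBisectGo fuel vals v lo mid
    else lo

def bBisect (vals : List Int) (v lo hi : Int) : Int :=
  bBisectGo (hi - lo).toNat vals v lo hi

-- loop body of Source B's candidate scan: 'if best is None or cand < best: best = cand' (tuple '<' is lexicographic)
def bStep (first : PySem.Dict Int Int) (v : Int) (b : Option (Int × Int)) (u : Int) : Option (Int × Int) :=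
  let cand := (|v - u|, first.getD u 0)
  match b with
  | none => some cand
  | some m => if cand.1 < m.1 ∨ (cand.1 = m.1 ∧ cand.2 < m.2) then some cand else some m

-- per v: binary-search vals, compare the ≤2 neighbouring candidates by (abs(v-u), first[u]).
-- 'none => 0' is unreachable under Pre_ (levels = []: Python B raises TypeError there).
def build_lut_alt (levels : List Int) : List Int :=
  (PySem.List.pyRange 0 256 1).map (fun v =>
    let lo := bBisect (bVals levels) v 0 ((bVals levels).length : Int)
    let cands := PySem.List.slice (bVals levels) (some (max (lo - 1) 0)) (some (lo + 1))
    match cands.foldl (bStep (bFirstDict levels) v) none with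
    | some m => m.2
    | none => 0)

-- ===== PRECONDITION & SPEC =====
-- Pre_ excludes exactly the empty list, on which the Python A raises IndexError (levels[0]).
def Pre_build_lut (levels : List Int) : Prop := levels ≠ []
instance (levels : List Int) : Decidable (Pre_build_lut levels) := by unfold Pre_build_lut; infer_instance
def pvWitness_build_lut : List Int := ([16, 128, 240] : List Int)
def Spec_build_lut (levels : List Int) (out : List Int) : Prop := out = build_lut_alt levels
instance (levels : List Int) (out : List Int) : Decidable (Spec_build_lut levels out) := by unfold Spec_build_lut; infer_instance

-- ===== CLAIM (what is proved, stated in full; the proofs are below) =====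
def Claim_equal_build_lut : Prop := ∀ (levels : List Int), Dom_build_lut levels → Pre_build_lut levels → Spec_build_lut levels (build_lut levels)

-- ===== LEMMAS AND PROOFS =====

lemma bisect_mid_lt {lo hi : Int} (h : lo < hi) :
    lo ≤ PySem.Int.floordiv (lo + hi) 2 ∧ PySem.Int.floordiv (lo + hi) 2 < hi := by
  have h1 := PySem.Int.floordiv_two_mid_bounds (lo := lo) (hi := hi) (le_of_lt h)
  have h2 : PySem.Int.floordiv (lo + hi) 2 < hi := by
    rw [PySem.Int.floordiv_lt_iff_lt_mul (by omega)]
    omega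
  exact ⟨h1.1, h2⟩

lemma pw_lt_getD {vals : List Int} (h : vals.Pairwise (· < ·)) {i j : Nat}
    (hij : i < j) (hj : j < vals.length) : vals.getD i 0 < vals.getD j 0 := by
  rw [List.pairwise_iff_getElem] at h
  have hx := h i j (by omega) hj hij
  rwa [List.getD_eq_getElem _ _ (by omega), List.getD_eq_getElem _ _ hj]

-- A's inner loop returns the first index of minimal |v - levels[i]| among the first m entries
lemma afold_spec (xs : List Int) (v : Int) :
    ∀ m : Nat, 1 ≤ m → m ≤ xs.length →
    ∃ k : Nat, k < m ∧
      ((PySem.List.pyRange 1 (m : Int) 1).foldl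
        (fun (b : Int × Int) i =>
          let d := |v - PySem.List.pyGetD xs i 0|
          if d < b.2 then (i, d) else b)
        (0, |v - PySem.List.pyGetD xs 0 0|))
      = ((k : Int), |v - xs.getD k 0|) ∧
      (∀ j : Nat, j < m → |v - xs.getD k 0| ≤ |v - xs.getD j 0|) ∧
      (∀ j : Nat, j < k → |v - xs.getD k 0| < |v - xs.getD j 0|) := by
  intro m hm
  induction m, hm using Nat.le_induction with
  | base =>
      intro _
      refine ⟨0, by omega, ?_, ?_, by omega⟩
      · simp [PySem.List.pyRange_one_eq_nil, PySem.List.pyGetD_zero]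
      · intro j hj
        have : j = 0 := by omega
        subst this; exact le_refl _
  | succ m hm IH =>
      intro hlen
      obtain ⟨k, hk, hfold, hmin, hstrict⟩ := IH (by omega)
      have hcast : ((m + 1 : Nat) : Int) = (m : Int) + 1 := by push_cast; ring
      rw [hcast, PySem.List.pyRange_one_succ_right (by exact_mod_cast hm), List.foldl_append, hfold]
      simp only [List.foldl_cons, List.foldl_nil, PySem.List.pyGetD_natCast]
      by_cases hlt : |v - xs.getD m 0| < |v - xs.getD k 0|
      · rw [if_pos hlt]
        refine ⟨m, by omega, rfl, ?_, ?_⟩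
        · intro j hj
          by_cases hjm : j = m
          · subst hjm; exact le_refl _
          · exact le_of_lt (lt_of_lt_of_le hlt (hmin j (by omega)))
        · intro j hj
          exact lt_of_lt_of_le hlt (hmin j (by omega))
      · rw [if_neg hlt]
        refine ⟨k, by omega, rfl, ?_, hstrict⟩
        intro j hj
        by_cases hjm : j = m
        · subst hjm; exact not_lt.mp hlt
        · exact hmin j (by omega)

lemma firstFold_frame (x w : Int) :
    ∀ (xs : List Int) (s : Int) (d : PySem.Dict Int Int), d.get? x = some w →
    ((PySem.List.enumerate xs s).foldl
      (fun d p => if d.contains p.2 then d else d.insert p.2 p.1) d).get? x = some w := by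
  intro xs
  induction xs with
  | nil => intro s d h; simpa [PySem.List.enumerate_nil] using h
  | cons y t IH =>
      intro s d h
      rw [PySem.List.enumerate_cons]
      simp only [List.foldl_cons]
      by_cases hc : d.contains y
      · simp only [hc, if_true]
        exact IH _ _ h
      · have hc' : d.contains y = false := by simpa using hc
        simp only [hc', Bool.false_eq_true, if_false]
        apply IH
        by_cases hxy : x = y
        · exfalso
          subst hxy
          have hcc := PySem.Dict.contains_eq_isSome_get? (d := d) (k := x)
          rw [h, hc'] at hcc
          simp at hcc
        · rw [PySem.Dict.get?_insert_of_ne d s hxy]; exact h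

lemma firstFold_get_aux (x : Int) :
    ∀ (xs : List Int) (s : Int) (d : PySem.Dict Int Int), d.get? x = none → x ∈ xs →
    ∃ k : Nat, k < xs.length ∧ xs.getD k 0 = x ∧ (∀ j : Nat, j < k → xs.getD j 0 ≠ x) ∧
      ((PySem.List.enumerate xs s).foldl
        (fun d p => if d.contains p.2 then d else d.insert p.2 p.1) d).get? x = some (s + (k : Int)) := by
  intro xs
  induction xs with
  | nil => intro s d _ hx; cases hx
  | cons y t IH =>
      intro s d hd hx
      rw [PySem.List.enumerate_cons]
      simp only [List.foldl_cons]
      by_cases hxy : x = y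
      · subst hxy
        have hc : d.contains x = false := by
          have hcc := PySem.Dict.contains_eq_isSome_get? (d := d) (k := x)
          rw [hd] at hcc; simpa using hcc
        simp only [hc, Bool.false_eq_true, if_false]
        refine ⟨0, by simp, by simp, by omega, ?_⟩
        have hins : (d.insert x s).get? x = some s := PySem.Dict.get?_insert_self d x s
        have hfr := firstFold_frame x s t (s + 1) _ hins
        simpa using hfr
      · have hx' : x ∈ t := by
          rcases List.mem_cons.mp hx with h | h
          · exact absurd h hxy
          · exact h
        by_cases hc : d.contains y
        · simp only [hc, if_true]
          obtain ⟨k, hk, hke, hkf, hfold⟩ := IH (s + 1) d hd hx'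
          refine ⟨k + 1, by simpa using Nat.succ_lt_succ hk, by simpa using hke, ?_, ?_⟩
          · intro j hj
            cases j with
            | zero => simpa using fun h => hxy h.symm
            | succ j' => simpa using hkf j' (by omega)
          · rw [hfold]; congr 1; push_cast; ring
        · have hc' : d.contains y = false := by simpa using hc
          simp only [hc', Bool.false_eq_true, if_false]
          have hd' : (d.insert y s).get? x = none := by
            rw [PySem.Dict.get?_insert_of_ne d s hxy]; exact hd
          obtain ⟨k, hk, hke, hkf, hfold⟩ := IH (s + 1) (d.insert y s) hd' hx'
          refine ⟨k + 1, by simpa using Nat.succ_lt_succ hk, by simpa using hke, ?_, ?_⟩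
          · intro j hj
            cases j with
            | zero => simpa using fun h => hxy h.symm
            | succ j' => simpa using hkf j' (by omega)
          · rw [hfold]; congr 1; push_cast; ring

-- first[x] is the index of the first occurrence of x
lemma first_getSome (xs : List Int) (x : Int) (hx : x ∈ xs) :
    ∃ k : Nat, k < xs.length ∧ xs.getD k 0 = x ∧ (∀ j : Nat, j < k → xs.getD j 0 ≠ x) ∧
      (bFirstDict xs).get? x = some (k : Int) := by
  obtain ⟨k, h1, h2, h3, h4⟩ :=
    firstFold_get_aux x xs 0 PySem.Dict.empty (by simp [PySem.Dict.get?_empty]) hx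
  exact ⟨k, h1, h2, h3, by simpa using h4⟩

lemma firstFold_keys :
    ∀ (xs : List Int) (s : Int) (d : PySem.Dict Int Int),
    ((PySem.List.enumerate xs s).foldl
      (fun d p => if d.contains p.2 then d else d.insert p.2 p.1) d).keys
    = PySem.Set.update d.keys xs := by
  intro xs
  induction xs with
  | nil => intro s d; simp [PySem.List.enumerate_nil, PySem.Set.update]
  | cons y t IH =>
      intro s d
      rw [PySem.List.enumerate_cons]
      simp only [List.foldl_cons]
      have hupd : PySem.Set.update d.keys (y :: t) = PySem.Set.update (PySem.Set.add d.keys y) t := by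
        simp [PySem.Set.update]
      rw [hupd]
      by_cases hc : d.contains y
      · simp only [hc, if_true]
        have hadd : PySem.Set.add d.keys y = d.keys := by
          have hmem : y ∈ d.keys := (PySem.Dict.contains_iff_mem_keys d y).mp hc
          simp [PySem.Set.add, hmem]
        rw [IH, hadd]
      · have hc' : d.contains y = false := by simpa using hc
        simp only [hc', Bool.false_eq_true, if_false]
        have hkeys : (d.insert y s).keys = d.keys ++ [y] :=
          PySem.Dict.keys_insert_of_not_contains d s hc'
        have hmem : y ∉ d.keys := fun hm => hc ((PySem.Dict.contains_iff_mem_keys d y).mpr hm)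
        have hadd : PySem.Set.add d.keys y = d.keys ++ [y] := by
          simp [PySem.Set.add, hmem]
        rw [IH, hkeys, hadd]

lemma first_keys (xs : List Int) : (bFirstDict xs).keys = PySem.Set.ofList xs := by
  rw [bFirstDict, firstFold_keys]
  rw [PySem.Set.ofList_eq_foldl]
  simp [PySem.Set.update, PySem.Dict.keys_empty]

lemma bStep_none (F : PySem.Dict Int Int) (v u : Int) :
    bStep F v none u = some (|v - u|, F.getD u 0) := rfl

lemma bStep_some (F : PySem.Dict Int Int) (v d0 i0 u : Int) :
    bStep F v (some (d0, i0)) u =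
      if |v - u| < d0 ∨ (|v - u| = d0 ∧ F.getD u 0 < i0)
      then some (|v - u|, F.getD u 0) else some (d0, i0) := rfl

lemma bBisectGo_spec (vals : List Int) (v : Int) (hPW : vals.Pairwise (· < ·)) :
    ∀ (fuel : Nat) (lo hi : Int), (hi - lo).toNat ≤ fuel → 0 ≤ lo → lo ≤ hi → hi ≤ (vals.length : Int) →
    (∀ j : Nat, (j : Int) < lo → vals.getD j 0 < v) →
    (∀ j : Nat, hi ≤ (j : Int) → j < vals.length → v ≤ vals.getD j 0) →
    0 ≤ bBisectGo fuel vals v lo hi ∧ bBisectGo fuel vals v lo hi ≤ (vals.length : Int) ∧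
    (∀ j : Nat, (j : Int) < bBisectGo fuel vals v lo hi → vals.getD j 0 < v) ∧
    (∀ j : Nat, bBisectGo fuel vals v lo hi ≤ (j : Int) → j < vals.length → v ≤ vals.getD j 0) := by
  intro fuel
  induction fuel with
  | zero =>
    intro lo hi hf h0 hlh hhL hbelow habove
    simp only [bBisectGo]
    exact ⟨h0, by omega, hbelow, fun j hj1 hj2 => habove j (by omega) hj2⟩
  | succ fuel IH =>
    intro lo hi hf h0 hlh hhL hbelow habove
    simp only [bBisectGo]
    by_cases hlt : lo < hi
    · rw [if_pos hlt]
      have hmid := bisect_mid_lt hlt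
      have hmid0 : 0 ≤ PySem.Int.floordiv (lo + hi) 2 := le_trans h0 hmid.1
      have hmidL : PySem.Int.floordiv (lo + hi) 2 < (vals.length : Int) := lt_of_lt_of_le hmid.2 hhL
      have hgd : PySem.List.pyGetD vals (PySem.Int.floordiv (lo + hi) 2) 0
          = vals.getD (PySem.Int.floordiv (lo + hi) 2).toNat 0 := by
        rw [PySem.List.pyGetD_eq_getElem vals 0 hmid0 hmidL, List.getD_eq_getElem _ _ (by omega)]
      by_cases hv : PySem.List.pyGetD vals (PySem.Int.floordiv (lo + hi) 2) 0 < v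
      · rw [if_pos hv]
        refine IH _ _ (by omega) (by omega) (by omega) hhL ?_ habove
        intro j hj
        rw [hgd] at hv
        by_cases hjm : j = (PySem.Int.floordiv (lo + hi) 2).toNat
        · rw [hjm]; exact hv
        · have hjlt : j < (PySem.Int.floordiv (lo + hi) 2).toNat := by omega
          have hpw := pw_lt_getD hPW hjlt (by omega)
          omega
      · rw [if_neg hv]
        refine IH _ _ (by omega) h0 hmid.1 (by omega) hbelow ?_
        intro j hj1 hj2
        have hmv : v ≤ vals.getD (PySem.Int.floordiv (lo + hi) 2).toNat 0 := by
          rw [← hgd]; exact not_lt.mp hv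
        by_cases hjm : j = (PySem.Int.floordiv (lo + hi) 2).toNat
        · rw [hjm]; exact hmv
        · have hjgt : (PySem.Int.floordiv (lo + hi) 2).toNat < j := by omega
          have hpw := pw_lt_getD hPW hjgt hj2
          omega
    · rw [if_neg hlt]
      exact ⟨h0, by omega, hbelow, fun j hj1 hj2 => habove j (by omega) hj2⟩

lemma bBisect_spec (vals : List Int) (v : Int) (hPW : vals.Pairwise (· < ·)) :
    ∀ (n : Nat) (lo hi : Int), (hi - lo).toNat = n → 0 ≤ lo → lo ≤ hi → hi ≤ (vals.length : Int) →
    (∀ j : Nat, (j : Int) < lo → vals.getD j 0 < v) →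
    (∀ j : Nat, hi ≤ (j : Int) → j < vals.length → v ≤ vals.getD j 0) →
    0 ≤ bBisect vals v lo hi ∧ bBisect vals v lo hi ≤ (vals.length : Int) ∧
    (∀ j : Nat, (j : Int) < bBisect vals v lo hi → vals.getD j 0 < v) ∧
    (∀ j : Nat, bBisect vals v lo hi ≤ (j : Int) → j < vals.length → v ≤ vals.getD j 0) := by
  intro n lo hi _ h0 hlh hhL hbelow habove
  exact bBisectGo_spec vals v hPW (hi - lo).toNat lo hi (le_refl _) h0 hlh hhL hbelow habove

-- A's loop result is the first index of minimal distance; any u0 with the same extremal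
-- properties therefore names the same index.
lemma winner_eq (xs : List Int) (hx : xs ≠ []) (v u0 : Int) (hu0 : u0 ∈ xs)
    (hmin : ∀ j : Nat, j < xs.length → |v - u0| ≤ |v - xs.getD j 0|)
    (htie : ∀ j : Nat, j < xs.length → |v - u0| = |v - xs.getD j 0| →
      (bFirstDict xs).getD u0 0 ≤ (bFirstDict xs).getD (xs.getD j 0) 0) :
    ((PySem.List.pyRange 1 (xs.length : Int) 1).foldl
      (fun (b : Int × Int) i =>
        let d := |v - PySem.List.pyGetD xs i 0|
        if d < b.2 then (i, d) else b)
      (0, |v - PySem.List.pyGetD xs 0 0|)).1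
    = (bFirstDict xs).getD u0 0 := by
  obtain ⟨k0, hk0n, hk0e, hk0f, hk0get⟩ := first_getSome xs u0 hu0
  have hF0 : (bFirstDict xs).getD u0 0 = (k0 : Int) := by
    rw [PySem.Dict.getD_eq_get?_getD, hk0get]; rfl
  have hmin0 : ∀ j : Nat, j < xs.length → |v - xs.getD k0 0| ≤ |v - xs.getD j 0| := by
    intro j hj; rw [hk0e]; exact hmin j hj
  have hstrict0 : ∀ j : Nat, j < k0 → |v - xs.getD k0 0| < |v - xs.getD j 0| := by
    intro j hj
    have hjn : j < xs.length := lt_trans hj hk0n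
    rcases lt_or_eq_of_le (hmin j hjn) with h | h
    · rw [hk0e]; exact h
    · exfalso
      have hle := htie j hjn h
      obtain ⟨kx, hkxn, hkxe, hkxf, hkxget⟩ := first_getSome xs (xs.getD j 0) (by
        rw [List.getD_eq_getElem _ _ hjn]; exact List.getElem_mem _)
      have hFx : (bFirstDict xs).getD (xs.getD j 0) 0 = (kx : Int) := by
        rw [PySem.Dict.getD_eq_get?_getD, hkxget]; rfl
      rw [hF0, hFx] at hle
      have hk0kx : k0 ≤ kx := by exact_mod_cast hle
      have hkxj : kx ≤ j := by
        by_contra hcon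
        exact (hkxf j (by omega)) rfl
      omega
  obtain ⟨kA, hkA, hfold, hminA, hstrictA⟩ := afold_spec xs v xs.length
    (by have := List.length_pos_of_ne_nil hx; omega) (le_refl _)
  rw [hfold, hF0]
  have hkk : kA = k0 := by
    by_contra hne
    rcases Nat.lt_or_ge kA k0 with h | h
    · exact absurd (hminA k0 hk0n) (not_le.mpr (hstrict0 kA h))
    · have h' : k0 < kA := by omega
      exact absurd (hmin0 kA hkA) (not_le.mpr (hstrictA k0 h'))
  simp [hkk]

-- ===== main pointwise lemma =====
lemma point_eq (xs : List Int) (hx : xs ≠ []) (v : Int) :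
    ((PySem.List.pyRange 1 (xs.length : Int) 1).foldl
      (fun (b : Int × Int) i =>
        let d := |v - PySem.List.pyGetD xs i 0|
        if d < b.2 then (i, d) else b)
      (0, |v - PySem.List.pyGetD xs 0 0|)).1
    = (match (PySem.List.slice (bVals xs)
          (some (max (bBisect (bVals xs) v 0 ((bVals xs).length : Int) - 1) 0))
          (some (bBisect (bVals xs) v 0 ((bVals xs).length : Int) + 1))).foldl
          (bStep (bFirstDict xs) v) none with
       | some m => m.2
       | none => 0) := by
  have hK := first_keys xs
  have hPW : (bVals xs).Pairwise (· < ·) := by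
    rw [bVals, hK]; exact PySem.List.sorted_ofList_pairwise_lt xs
  have hmemv : ∀ y : Int, y ∈ bVals xs ↔ y ∈ xs := by
    intro y
    rw [bVals, PySem.List.mem_sorted, hK, PySem.Set.mem_ofList]
  have hvne : bVals xs ≠ [] := by
    obtain ⟨c, t, hct⟩ := List.exists_cons_of_ne_nil hx
    have hcm : c ∈ bVals xs := (hmemv c).mpr (by rw [hct]; exact List.mem_cons_self)
    exact List.ne_nil_of_mem hcm
  have hL1 : 0 < (bVals xs).length := List.length_pos_of_ne_nil hvne
  have hmono : ∀ p q : Nat, p ≤ q → q < (bVals xs).length →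
      (bVals xs).getD p 0 ≤ (bVals xs).getD q 0 := by
    intro p q hpq hq
    rcases Nat.lt_or_ge q p with h | h
    · omega
    · rcases Nat.lt_or_ge p q with h2 | h2
      · exact le_of_lt (pw_lt_getD hPW h2 hq)
      · have : p = q := by omega
        rw [this]
  obtain ⟨hr0, hrL, hbel, habv⟩ := bBisect_spec (bVals xs) v hPW
      (((bVals xs).length : Int) - 0).toNat 0 ((bVals xs).length : Int)
      rfl (le_refl 0) (by exact_mod_cast Nat.zero_le _) (le_refl _)
      (by intro j hj; exact absurd hj (by omega))
      (by intro j hj1 hj2; exact absurd hj2 (by omega))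
  set r := bBisect (bVals xs) v 0 ((bVals xs).length : Int) with hrdef
  obtain ⟨k, hrk⟩ : ∃ k : Nat, r = (k : Int) := ⟨r.toNat, by omega⟩
  have hkL : k ≤ (bVals xs).length := by omega
  have hbel' : ∀ p : Nat, p < k → (bVals xs).getD p 0 < v := by
    intro p hp; exact hbel p (by omega)
  have habv' : ∀ p : Nat, k ≤ p → p < (bVals xs).length → v ≤ (bVals xs).getD p 0 := by
    intro p hp1 hp2; exact habv p (by omega) hp2
  have hvalmem : ∀ p : Nat, p < (bVals xs).length → (bVals xs).getD p 0 ∈ xs := by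
    intro p hp
    have h1 : (bVals xs).getD p 0 ∈ bVals xs := by
      rw [List.getD_eq_getElem _ _ hp]; exact List.getElem_mem _
    exact (hmemv _).mp h1
  have hxval : ∀ j : Nat, j < xs.length →
      ∃ p : Nat, p < (bVals xs).length ∧ (bVals xs).getD p 0 = xs.getD j 0 := by
    intro j hj
    have hmem : xs.getD j 0 ∈ xs := by rw [List.getD_eq_getElem _ _ hj]; exact List.getElem_mem _
    have hv2 : xs.getD j 0 ∈ bVals xs := (hmemv _).mpr hmem
    obtain ⟨p, hp, hpe⟩ := List.getElem_of_mem hv2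
    exact ⟨p, hp, by rw [List.getD_eq_getElem _ _ hp]; exact hpe⟩
  have hclose : ∀ u0 : Int, u0 ∈ xs →
      (∀ p : Nat, p < (bVals xs).length → |v - u0| ≤ |v - (bVals xs).getD p 0|) →
      (∀ p : Nat, p < (bVals xs).length → |v - u0| = |v - (bVals xs).getD p 0| →
        (bFirstDict xs).getD u0 0 ≤ (bFirstDict xs).getD ((bVals xs).getD p 0) 0) →
      ((PySem.List.pyRange 1 (xs.length : Int) 1).foldl
        (fun (b : Int × Int) i =>
          let d := |v - PySem.List.pyGetD xs i 0|
          if d < b.2 then (i, d) else b)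
        (0, |v - PySem.List.pyGetD xs 0 0|)).1 = (bFirstDict xs).getD u0 0 := by
    intro u0 hu0 hminv htiev
    apply winner_eq xs hx v u0 hu0
    · intro j hj
      obtain ⟨p, hp, hpe⟩ := hxval j hj
      rw [← hpe]; exact hminv p hp
    · intro j hj heq
      obtain ⟨p, hp, hpe⟩ := hxval j hj
      rw [← hpe] at heq ⊢
      exact htiev p hp heq
  rw [hrk]
  have hmax : max ((k : Int) - 1) 0 = ((k - 1 : Nat) : Int) := by
    rcases Nat.eq_zero_or_pos k with h | h
    · rw [h]; simp
    · have hle : (0 : Int) ≤ (k : Int) - 1 := by omega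
      rw [max_eq_left hle]; omega
  have hplus : (k : Int) + 1 = ((k + 1 : Nat) : Int) := by push_cast; ring
  rw [hmax, hplus, PySem.List.slice_natCast]
  rcases Nat.eq_zero_or_pos k with hk0 | hkpos
  · -- insertion point 0: single candidate vals[0]
    have hcands : List.take (k + 1 - (k - 1)) (List.drop (k - 1) (bVals xs))
        = [(bVals xs).getD 0 0] := by
      have h1 : k + 1 - (k - 1) = 1 := by omega
      have h2 : k - 1 = 0 := by omega
      obtain ⟨c, t, hct⟩ := List.exists_cons_of_ne_nil hvne
      rw [h1, h2, List.drop_zero, hct]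
      rfl
    rw [hcands, List.foldl_cons, bStep_none, List.foldl_nil]
    exact hclose ((bVals xs).getD 0 0) (hvalmem 0 hL1)
      (by
        intro p hp
        have h0 : v ≤ (bVals xs).getD 0 0 := habv' 0 (by omega) hL1
        have hpv : v ≤ (bVals xs).getD p 0 := habv' p (by omega) hp
        have hm := hmono 0 p (by omega) hp
        have e1 : |v - (bVals xs).getD 0 0| = (bVals xs).getD 0 0 - v := by
          rw [abs_sub_comm]; exact abs_of_nonneg (by omega)
        have e2 : |v - (bVals xs).getD p 0| = (bVals xs).getD p 0 - v := by
          rw [abs_sub_comm]; exact abs_of_nonneg (by omega)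
        rw [e1, e2]; omega)
      (by
        intro p hp heq
        have h0 : v ≤ (bVals xs).getD 0 0 := habv' 0 (by omega) hL1
        have hpv : v ≤ (bVals xs).getD p 0 := habv' p (by omega) hp
        have e1 : |v - (bVals xs).getD 0 0| = (bVals xs).getD 0 0 - v := by
          rw [abs_sub_comm]; exact abs_of_nonneg (by omega)
        have e2 : |v - (bVals xs).getD p 0| = (bVals xs).getD p 0 - v := by
          rw [abs_sub_comm]; exact abs_of_nonneg (by omega)
        rw [e1, e2] at heq
        have hvv : (bVals xs).getD 0 0 = (bVals xs).getD p 0 := by omega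
        rw [hvv])
  · rcases Nat.lt_or_ge k (bVals xs).length with hkL' | hkge
    · -- middle: two candidates vals[k-1], vals[k]
      have hk1L : k - 1 < (bVals xs).length := by omega
      have hcands : List.take (k + 1 - (k - 1)) (List.drop (k - 1) (bVals xs))
          = [(bVals xs).getD (k - 1) 0, (bVals xs).getD k 0] := by
        have h2 : k + 1 - (k - 1) = 2 := by omega
        have hd1 := List.drop_eq_getElem_cons hk1L
        have hs1 : k - 1 + 1 = k := by omega
        have hd2 := List.drop_eq_getElem_cons hkL'
        rw [h2, hd1, hs1, hd2, List.getD_eq_getElem _ _ hk1L, List.getD_eq_getElem _ _ hkL']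
        rfl
      rw [hcands, List.foldl_cons, bStep_none, List.foldl_cons, bStep_some, List.foldl_nil]
      set av := (bVals xs).getD (k - 1) 0 with havdef
      set bv := (bVals xs).getD k 0 with hbvdef
      have hav : av < v := hbel' (k - 1) (by omega)
      have hbv : v ≤ bv := habv' k (le_refl k) hkL'
      have ea : |v - av| = v - av := abs_of_nonneg (by omega)
      have eb : |v - bv| = bv - v := by rw [abs_sub_comm]; exact abs_of_nonneg (by omega)
      by_cases hC : |v - bv| < |v - av| ∨
          (|v - bv| = |v - av| ∧ (bFirstDict xs).getD bv 0 < (bFirstDict xs).getD av 0)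
      · rw [if_pos hC]
        have hba : bv - v ≤ v - av := by
          rcases hC with h | ⟨h, _⟩
          · rw [ea, eb] at h; omega
          · rw [ea, eb] at h; omega
        refine hclose bv (hvalmem k hkL') ?_ ?_
        · intro p hp
          rcases Nat.lt_or_ge p k with hpk | hpk
          · have hple : (bVals xs).getD p 0 ≤ av := by
              rcases Nat.lt_or_ge p (k - 1) with h | h
              · exact le_of_lt (pw_lt_getD hPW h hk1L)
              · have hpe : p = k - 1 := by omega
                rw [hpe]
            have hpv : (bVals xs).getD p 0 < v := hbel' p hpk
            have e2 : |v - (bVals xs).getD p 0| = v - (bVals xs).getD p 0 :=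
              abs_of_nonneg (by omega)
            rw [eb, e2]; omega
          · have hpge : bv ≤ (bVals xs).getD p 0 := hmono k p hpk hp
            have hpv : v ≤ (bVals xs).getD p 0 := habv' p hpk hp
            have e2 : |v - (bVals xs).getD p 0| = (bVals xs).getD p 0 - v := by
              rw [abs_sub_comm]; exact abs_of_nonneg (by omega)
            rw [eb, e2]; omega
        · intro p hp heq
          rcases Nat.lt_or_ge p k with hpk | hpk
          · have hple : (bVals xs).getD p 0 ≤ av := by
              rcases Nat.lt_or_ge p (k - 1) with h | h
              · exact le_of_lt (pw_lt_getD hPW h hk1L)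
              · have hpe : p = k - 1 := by omega
                rw [hpe]
            have hpv : (bVals xs).getD p 0 < v := hbel' p hpk
            have e2 : |v - (bVals xs).getD p 0| = v - (bVals xs).getD p 0 :=
              abs_of_nonneg (by omega)
            rw [eb, e2] at heq
            have hpa : (bVals xs).getD p 0 = av := by omega
            rw [hpa]
            rcases hC with h | ⟨h1, h2⟩
            · exfalso; rw [ea, eb] at h; omega
            · exact le_of_lt h2
          · have hpge : bv ≤ (bVals xs).getD p 0 := hmono k p hpk hp
            have hpv : v ≤ (bVals xs).getD p 0 := habv' p hpk hp
            have e2 : |v - (bVals xs).getD p 0| = (bVals xs).getD p 0 - v := by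
              rw [abs_sub_comm]; exact abs_of_nonneg (by omega)
            rw [eb, e2] at heq
            have hpb : (bVals xs).getD p 0 = bv := by omega
            rw [hpb]
      · rw [if_neg hC]
        have hC1 : |v - av| ≤ |v - bv| := not_lt.mp (fun h => hC (Or.inl h))
        have hC2 : |v - bv| = |v - av| →
            (bFirstDict xs).getD av 0 ≤ (bFirstDict xs).getD bv 0 :=
          fun he => not_lt.mp (fun h => hC (Or.inr ⟨he, h⟩))
        have hab : v - av ≤ bv - v := by rw [ea, eb] at hC1; omega
        refine hclose av (hvalmem (k - 1) hk1L) ?_ ?_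
        · intro p hp
          rcases Nat.lt_or_ge p k with hpk | hpk
          · have hple : (bVals xs).getD p 0 ≤ av := by
              rcases Nat.lt_or_ge p (k - 1) with h | h
              · exact le_of_lt (pw_lt_getD hPW h hk1L)
              · have hpe : p = k - 1 := by omega
                rw [hpe]
            have hpv : (bVals xs).getD p 0 < v := hbel' p hpk
            have e2 : |v - (bVals xs).getD p 0| = v - (bVals xs).getD p 0 :=
              abs_of_nonneg (by omega)
            rw [ea, e2]; omega
          · have hpge : bv ≤ (bVals xs).getD p 0 := hmono k p hpk hp
            have hpv : v ≤ (bVals xs).getD p 0 := habv' p hpk hp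
            have e2 : |v - (bVals xs).getD p 0| = (bVals xs).getD p 0 - v := by
              rw [abs_sub_comm]; exact abs_of_nonneg (by omega)
            rw [ea, e2]; omega
        · intro p hp heq
          rcases Nat.lt_or_ge p k with hpk | hpk
          · have hple : (bVals xs).getD p 0 ≤ av := by
              rcases Nat.lt_or_ge p (k - 1) with h | h
              · exact le_of_lt (pw_lt_getD hPW h hk1L)
              · have hpe : p = k - 1 := by omega
                rw [hpe]
            have hpv : (bVals xs).getD p 0 < v := hbel' p hpk
            have e2 : |v - (bVals xs).getD p 0| = v - (bVals xs).getD p 0 :=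
              abs_of_nonneg (by omega)
            rw [ea, e2] at heq
            have hpa : (bVals xs).getD p 0 = av := by omega
            rw [hpa]
          · have hpge : bv ≤ (bVals xs).getD p 0 := hmono k p hpk hp
            have hpv : v ≤ (bVals xs).getD p 0 := habv' p hpk hp
            have e2 : |v - (bVals xs).getD p 0| = (bVals xs).getD p 0 - v := by
              rw [abs_sub_comm]; exact abs_of_nonneg (by omega)
            rw [ea, e2] at heq
            have hpb : (bVals xs).getD p 0 = bv := by omega
            rw [hpb]
            apply hC2
            rw [ea, eb]; omega
    · -- insertion point = length: single candidate vals[len-1]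
      have hkeq : k = (bVals xs).length := by omega
      have hk1L : k - 1 < (bVals xs).length := by omega
      have hcands : List.take (k + 1 - (k - 1)) (List.drop (k - 1) (bVals xs))
          = [(bVals xs).getD (k - 1) 0] := by
        have h2 : k + 1 - (k - 1) = 2 := by omega
        have hd1 := List.drop_eq_getElem_cons hk1L
        have hs1 : k - 1 + 1 = k := by omega
        have hdk : List.drop k (bVals xs) = [] := by rw [hkeq, List.drop_length]
        rw [h2, hd1, hs1, hdk, List.getD_eq_getElem _ _ hk1L]
        rfl
      rw [hcands, List.foldl_cons, bStep_none, List.foldl_nil]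
      refine hclose ((bVals xs).getD (k - 1) 0) (hvalmem (k - 1) hk1L) ?_ ?_
      · intro p hp
        have hpv : (bVals xs).getD p 0 < v := hbel' p (by omega)
        have hav : (bVals xs).getD (k - 1) 0 < v := hbel' (k - 1) (by omega)
        have hm := hmono p (k - 1) (by omega) hk1L
        have e1 : |v - (bVals xs).getD (k - 1) 0| = v - (bVals xs).getD (k - 1) 0 :=
          abs_of_nonneg (by omega)
        have e2 : |v - (bVals xs).getD p 0| = v - (bVals xs).getD p 0 :=
          abs_of_nonneg (by omega)
        rw [e1, e2]; omega
      · intro p hp heq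
        have hpv : (bVals xs).getD p 0 < v := hbel' p (by omega)
        have hav : (bVals xs).getD (k - 1) 0 < v := hbel' (k - 1) (by omega)
        have e1 : |v - (bVals xs).getD (k - 1) 0| = v - (bVals xs).getD (k - 1) 0 :=
          abs_of_nonneg (by omega)
        have e2 : |v - (bVals xs).getD p 0| = v - (bVals xs).getD p 0 :=
          abs_of_nonneg (by omega)
        rw [e1, e2] at heq
        have hvv : (bVals xs).getD p 0 = (bVals xs).getD (k - 1) 0 := by omega
        rw [hvv]

-- ===== VERDICT (by name: the statement is the Claim_ definition above) =====
theorem build_lut_spec : Claim_equal_build_lut := by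
  intro levels _ hpre
  unfold Spec_build_lut build_lut build_lut_alt
  exact List.map_congr_left (fun v _ => point_eq levels hpre v)
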